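-- pv_equiv track=rewrite | github.com/Hulyamr13/hackerrank | Pairwise Sum and Divide.py | solve
-- ===== SOURCE A (Python) =====
-- def solve(a):
--     # Write your code here
--     cnt1 = a.count(1)
--     cnt2 = a.count(2)
--     n = len(a)
--     x = [i for i in range(n) if a[i] == 1]
--
--     total_sum = 0
--     if cnt2 > 1:
--         total_sum += (cnt2 * (cnt2 - 1)) // 2
--
--     if cnt1 > 1:
--         total_sum += cnt1 * (cnt1 - 1)
--
--     for i in range(n):
--         if a[i] != 1:
--             total_sum += cnt1
--
--     return total_sum
-- ===== SOURCE B (Python) =====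
-- def solve(a):
--     # Write your code here
--     total = 0
--     rest = a
--     while rest:
--         x = rest[0]
--         rest = rest[1:]
--         for y in rest:
--             if x == 1:
--                 total += 1
--             if y == 1:
--                 total += 1
--             if x == 2 and y == 2:
--                 total += 1
--     return total
-- ===== Notes on version B (the rewrite author's own statement) =====
-- stated objective: alternative
-- what changed: Replaces A's count-based closed form (counts of 1s and 2s plus an index loop) with a direct quadratic scan over all pairs i<j, accumulating a per-pair contribution (x==1)+(y==1)+(x==2 and y==2).
import Mathlib
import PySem

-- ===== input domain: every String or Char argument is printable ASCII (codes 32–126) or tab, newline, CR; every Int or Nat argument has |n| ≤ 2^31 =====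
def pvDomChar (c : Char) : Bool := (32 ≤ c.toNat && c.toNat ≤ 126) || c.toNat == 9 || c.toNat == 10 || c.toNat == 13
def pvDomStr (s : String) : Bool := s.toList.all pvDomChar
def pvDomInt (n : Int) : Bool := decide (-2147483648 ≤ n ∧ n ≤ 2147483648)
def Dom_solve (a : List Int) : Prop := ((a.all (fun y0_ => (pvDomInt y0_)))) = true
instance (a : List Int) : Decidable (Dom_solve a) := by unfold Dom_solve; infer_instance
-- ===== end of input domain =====

-- B replaces A's count-based closed form with a direct O(n^2) loop over all pairs i<j,
-- adding a value-keyed contribution per pair (objective: alternative algorithm, not faster).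


-- ===== PORT A =====
def solve (a : List Int) : Int :=
  let cnt1 : Int := (PySem.List.count a 1 : Int)
  let cnt2 : Int := (PySem.List.count a 2 : Int)
  let n : Int := (a.length : Int)
  let _x : List Int := (PySem.List.pyRange 0 n 1).filter
      (fun i => PySem.List.pyGetD a i 0 == 1)
  let total0 : Int := 0
  let total1 : Int := if cnt2 > 1 then total0 + PySem.Int.floordiv (cnt2 * (cnt2 - 1)) 2 else total0
  let total2 : Int := if cnt1 > 1 then total1 + cnt1 * (cnt1 - 1) else total1
  (PySem.List.pyRange 0 n 1).foldl
    (fun t i => if PySem.List.pyGetD a i 0 ≠ 1 then t + cnt1 else t) total2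

-- ===== PORT B =====
-- contribution of one pair (x, y) with x before y
def pairContrib (x y : Int) : Int :=
  (if x = 1 then 1 else 0) + (if y = 1 then 1 else 0) + (if x = 2 ∧ y = 2 then 1 else 0)

-- while rest: pair rest[0] with every later element, then drop it
def solveAltGo (total : Int) : List Int → Int
  | [] => total
  | x :: rest => solveAltGo (rest.foldl (fun t y => t + pairContrib x y) total) rest

def solve_alt (a : List Int) : Int := solveAltGo 0 a

-- ===== PRECONDITION & SPEC =====
def Spec_solve (a : List Int) (out : Int) : Prop := out = solve_alt a
instance (a : List Int) (out : Int) : Decidable (Spec_solve a out) := by unfold Spec_solve; infer_instance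

-- ===== CLAIM (what is proved, stated in full; the proofs are below) =====
def Claim_equal_solve : Prop := ∀ (a : List Int), Dom_solve a → Spec_solve a (solve a)

-- ===== LEMMAS AND PROOFS =====

-- shared closed form both ports are reduced to
def pvForm (a : List Int) : Int :=
  (Nat.choose (a.count 2) 2 : Int) + (a.count 1 : Int) * ((a.length : Int) - 1)

theorem foldl_if_ne_add (l : List Int) (c t0 : Int) :
    l.foldl (fun t v => if v ≠ 1 then t + c else t) t0
      = t0 + c * (l.countP (fun v => v ≠ 1) : Int) := by
  induction l generalizing t0 with
  | nil => simp
  | cons x xs ih =>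
    rw [List.foldl_cons, ih, List.countP_cons]
    by_cases hx : x = 1 <;> simp [hx] <;> push_cast <;> ring

theorem countP_ne_one (l : List Int) :
    l.countP (fun v => v ≠ 1) + l.count 1 = l.length := by
  induction l with
  | nil => simp
  | cons x xs ih =>
    by_cases hx : x = 1 <;> simp [List.countP_cons, List.count_cons, hx] at ih ⊢ <;> omega

theorem solve_eq_form (a : List Int) : solve a = pvForm a := by
  unfold solve pvForm
  simp only [PySem.List.count_eq]
  rw [PySem.List.foldl_pyRange_zero_pyGetD' a 0
      (fun t v => if v ≠ 1 then t + ((a.count 1 : Int)) else t)]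
  rw [foldl_if_ne_add]
  have hcp := countP_ne_one a
  have hc2 : a.count 2 ≤ a.length := List.count_le_length
  set c1 := a.count 1 with hc1def
  set c2 := a.count 2 with hc2def
  set p := a.countP (fun v => v ≠ 1) with hpdef
  have h2 : (if ((c2 : Int)) > 1 then (0 : Int) + PySem.Int.floordiv ((c2 : Int) * ((c2 : Int) - 1)) 2 else 0)
      = (Nat.choose c2 2 : Int) := by
    by_cases h : ((c2 : Int)) > 1
    · have hge : 1 ≤ c2 := by exact_mod_cast (by omega : (1:Int) ≤ (c2:Int))
      rw [if_pos h, PySem.Int.floordiv_eq_ediv_of_pos (by omega), Nat.choose_two_right]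
      have hcast : (c2 : Int) * ((c2 : Int) - 1) = ((c2 * (c2 - 1) : Nat) : Int) := by
        push_cast [hge]; ring
      rw [hcast]
      omega
    · have hle : c2 ≤ 1 := by exact_mod_cast (by omega : ((c2:Int)) ≤ 1)
      rw [if_neg h]
      interval_cases c2 <;> simp
  rw [h2]
  by_cases h1 : ((c1 : Int)) > 1
  · rw [if_pos h1]
    have : (p : Int) = (a.length : Int) - (c1 : Int) := by
      push_cast; omega
    rw [this]; ring
  · rw [if_neg h1]
    have hle : c1 ≤ 1 := by exact_mod_cast (by omega : ((c1:Int)) ≤ 1)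
    have hp : (p : Int) = (a.length : Int) - (c1 : Int) := by
      push_cast; omega
    rw [hp]
    interval_cases c1 <;> push_cast <;> ring

theorem foldl_pairContrib (x : Int) (l : List Int) (t : Int) :
    l.foldl (fun t y => t + pairContrib x y) t
      = t + (if x = 1 then (l.length : Int) else 0) + (l.count 1 : Int)
          + (if x = 2 then (l.count 2 : Int) else 0) := by
  induction l generalizing t with
  | nil => simp
  | cons y ys ih =>
    rw [List.foldl_cons, ih]
    simp only [pairContrib, List.length_cons, List.count_cons]
    by_cases hx1 : x = 1 <;> by_cases hy1 : y = 1 <;> by_cases hx2 : x = 2 <;>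
      by_cases hy2 : y = 2 <;> simp [hx1, hy1, hx2, hy2] <;> push_cast <;> ring

theorem solveAltGo_eq (l : List Int) : ∀ t : Int, solveAltGo t l = t + pvForm l := by
  induction l with
  | nil => intro t; simp [solveAltGo, pvForm]
  | cons x rest ih =>
    intro t
    rw [solveAltGo, ih, foldl_pairContrib]
    unfold pvForm
    simp only [List.count_cons, List.length_cons]
    by_cases hx1 : x = 1 <;> by_cases hx2 : x = 2
    · omega
    · -- x = 1
      simp [hx1, hx2]
      push_cast
      ring
    · -- x = 2 : choose (c2+1) 2 = choose c2 2 + c2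
      simp [hx1, hx2]
      rw [Nat.choose_succ_succ' (rest.count 2) 1]
      push_cast [Nat.choose_one_right]
      ring
    · simp [hx1, hx2]
      push_cast
      ring

-- ===== VERDICT (by name: the statement is the Claim_ definition above) =====
theorem solve_spec : Claim_equal_solve := by
  intro a _
  unfold Spec_solve solve_alt
  rw [solve_eq_form, solveAltGo_eq, zero_add]
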